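-- pv_equiv track=rewrite | github.com/spo587/set_flask | extras_set.py | fourcardcombos
-- ===== SOURCE A (Python) =====
-- def fourcardcombos(numcards):
--     '''samesies for four cards. we'll want this for superset'''
--     listoffourcardcombos=[]
--     for i in range(numcards-3):
--         for j in range(i+1,numcards-2):
--             for k in range(j+1,numcards-1):
--                 for t in range(k+1,numcards):
--                     listoffourcardcombos.append((i,j,k,t))
--     return listoffourcardcombos
-- ===== SOURCE B (Python) =====
-- def fourcardcombos(numcards):
--     '''Recursive generic combination builder instead of four hard-coded nested loops.'''
--     def pick(start, depth):
--         if depth == 0: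
--             return [[]]
--         return [[i] + rest
--                 for i in range(start, numcards)
--                 for rest in pick(i + 1, depth - 1)]
--     return [tuple(c) for c in pick(0, 4)]
-- ===== Notes on version B (the rewrite author's own statement) =====
-- stated objective: alternative
-- what changed: Replaces A's four hard-coded nested for-loops with a recursive generic combination builder pick(start, depth) that enumerates depth-element increasing index lists, specialised to depth 4.
import Mathlib
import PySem

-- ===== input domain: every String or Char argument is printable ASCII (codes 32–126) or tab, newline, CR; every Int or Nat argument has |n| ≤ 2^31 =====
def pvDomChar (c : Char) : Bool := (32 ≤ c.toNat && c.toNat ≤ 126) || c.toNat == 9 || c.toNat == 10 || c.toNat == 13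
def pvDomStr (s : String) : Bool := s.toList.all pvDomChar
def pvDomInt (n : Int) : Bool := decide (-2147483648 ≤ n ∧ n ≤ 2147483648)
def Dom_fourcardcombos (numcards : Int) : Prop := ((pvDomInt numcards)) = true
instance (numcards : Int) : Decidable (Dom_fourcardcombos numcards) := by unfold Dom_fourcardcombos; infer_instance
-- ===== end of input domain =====

-- B replaces A's four hard-coded nested loops by a recursive generic combination builder (alternative decomposition, same cost).

-- ===== PORT A =====
def fourcardcombos (numcards : Int) : List (Int × Int × Int × Int) :=
  (PySem.List.pyRange 0 (numcards - 3) 1).foldl (fun acc i =>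
    (PySem.List.pyRange (i + 1) (numcards - 2) 1).foldl (fun acc j =>
      (PySem.List.pyRange (j + 1) (numcards - 1) 1).foldl (fun acc k =>
        (PySem.List.pyRange (k + 1) numcards 1).foldl (fun acc t =>
          acc ++ [(i, j, k, t)]) acc) acc) acc) []

-- ===== PORT B =====
-- pick start depth: all 'depth'-element increasing index lists drawn from start..numcards-1
def pvPick (numcards : Int) : Int → Nat → List (List Int)
  | _, 0 => [[]]
  | start, d + 1 =>
      (PySem.List.pyRange start numcards 1).flatMap (fun i =>
        (pvPick numcards (i + 1) d).map (fun rest => i :: rest))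

-- tuple(c) for the 4-element lists pick produces (the catch-all branch is unreachable)
def pvToTuple (c : List Int) : Int × Int × Int × Int :=
  match c with
  | [a, b, cc, d] => (a, b, cc, d)
  | _ => (0, 0, 0, 0)

def fourcardcombos_alt (numcards : Int) : List (Int × Int × Int × Int) :=
  (pvPick numcards 0 4).map pvToTuple

-- ===== PRECONDITION & SPEC =====
def Spec_fourcardcombos (numcards : Int) (out : List (Int × Int × Int × Int)) : Prop := out = fourcardcombos_alt numcards
instance (numcards : Int) (out : List (Int × Int × Int × Int)) : Decidable (Spec_fourcardcombos numcards out) := by unfold Spec_fourcardcombos; infer_instance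

-- ===== CLAIM (what is proved, stated in full; the proofs are below) =====
def Claim_equal_fourcardcombos : Prop := ∀ (numcards : Int), Dom_fourcardcombos numcards → Spec_fourcardcombos numcards (fourcardcombos numcards)

-- ===== LEMMAS AND PROOFS =====

-- a range-flatMap may be truncated at any cutoff c past which the body is empty
lemma pv_flatMap_pyRange_cut {α : Type} (a c b : Int) (hcb : c ≤ b) (f : Int → List α)
    (hf : ∀ x, c ≤ x → f x = []) :
    (PySem.List.pyRange a b 1).flatMap f = (PySem.List.pyRange a c 1).flatMap f := by
  by_cases hac : a ≤ c
  · rw [PySem.List.pyRange_one_append a c b hac hcb, List.flatMap_append]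
    have h0 : (PySem.List.pyRange c b 1).flatMap f = [] := by
      rw [List.flatMap_eq_nil_iff]
      intro x hx
      exact hf x (PySem.List.mem_pyRange_one.mp hx).1
    simp [h0]
  · have h0 : (PySem.List.pyRange a b 1).flatMap f = [] := by
      rw [List.flatMap_eq_nil_iff]
      intro x hx
      exact hf x (le_trans (by omega) (PySem.List.mem_pyRange_one.mp hx).1)
    rw [h0, PySem.List.pyRange_one_eq_nil (show c ≤ a by omega)]
    simp

-- level-3 cut: the k-loop may stop at numcards-1, since for k ≥ numcards-1 the t-range is empty
lemma pv_cut3 (n i j : Int) :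
    (PySem.List.pyRange (j + 1) n 1).flatMap (fun k =>
      (PySem.List.pyRange (k + 1) n 1).flatMap (fun t => ([(i, j, k, t)] : List (Int × Int × Int × Int)))) =
    (PySem.List.pyRange (j + 1) (n - 1) 1).flatMap (fun k =>
      (PySem.List.pyRange (k + 1) n 1).flatMap (fun t => [(i, j, k, t)])) := by
  refine pv_flatMap_pyRange_cut _ _ _ (by omega) _ (fun k hk => ?_)
  rw [PySem.List.pyRange_one_eq_nil (by omega)]
  simp

-- level-2 cut: the j-loop may stop at numcards-2
lemma pv_cut2 (n i : Int) :
    (PySem.List.pyRange (i + 1) n 1).flatMap (fun j =>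
      (PySem.List.pyRange (j + 1) (n - 1) 1).flatMap (fun k =>
        (PySem.List.pyRange (k + 1) n 1).flatMap (fun t => ([(i, j, k, t)] : List (Int × Int × Int × Int))))) =
    (PySem.List.pyRange (i + 1) (n - 2) 1).flatMap (fun j =>
      (PySem.List.pyRange (j + 1) (n - 1) 1).flatMap (fun k =>
        (PySem.List.pyRange (k + 1) n 1).flatMap (fun t => [(i, j, k, t)]))) := by
  refine pv_flatMap_pyRange_cut _ _ _ (by omega) _ (fun j hj => ?_)
  rw [PySem.List.pyRange_one_eq_nil (by omega)]
  simp

-- level-1 cut: the i-loop may stop at numcards-3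
lemma pv_cut1 (n : Int) :
    (PySem.List.pyRange 0 n 1).flatMap (fun i =>
      (PySem.List.pyRange (i + 1) (n - 2) 1).flatMap (fun j =>
        (PySem.List.pyRange (j + 1) (n - 1) 1).flatMap (fun k =>
          (PySem.List.pyRange (k + 1) n 1).flatMap (fun t => ([(i, j, k, t)] : List (Int × Int × Int × Int)))))) =
    (PySem.List.pyRange 0 (n - 3) 1).flatMap (fun i =>
      (PySem.List.pyRange (i + 1) (n - 2) 1).flatMap (fun j =>
        (PySem.List.pyRange (j + 1) (n - 1) 1).flatMap (fun k =>
          (PySem.List.pyRange (k + 1) n 1).flatMap (fun t => [(i, j, k, t)])))) := by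
  refine pv_flatMap_pyRange_cut _ _ _ (by omega) _ (fun i hi => ?_)
  rw [PySem.List.pyRange_one_eq_nil (by omega)]
  simp

-- A's four append-loops, written as nested flatMaps
lemma pv_A_eq_flatMap (n : Int) :
    fourcardcombos n =
    (PySem.List.pyRange 0 (n - 3) 1).flatMap (fun i =>
      (PySem.List.pyRange (i + 1) (n - 2) 1).flatMap (fun j =>
        (PySem.List.pyRange (j + 1) (n - 1) 1).flatMap (fun k =>
          (PySem.List.pyRange (k + 1) n 1).flatMap (fun t => [(i, j, k, t)])))) := by
  simp only [fourcardcombos, PySem.List.foldl_append_singleton_eq_map,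
    PySem.List.foldl_append_eq_flatMap, List.nil_append, List.map_eq_flatMap]

-- B's recursion, unfolded to the same nested-flatMap shape (all four bounds = numcards)
lemma pv_B_eq_flatMap (n : Int) :
    fourcardcombos_alt n =
    (PySem.List.pyRange 0 n 1).flatMap (fun i =>
      (PySem.List.pyRange (i + 1) n 1).flatMap (fun j =>
        (PySem.List.pyRange (j + 1) n 1).flatMap (fun k =>
          (PySem.List.pyRange (k + 1) n 1).flatMap (fun t => [(i, j, k, t)])))) := by
  simp only [fourcardcombos_alt, pvPick, List.map_flatMap, List.map_map, Function.comp_def]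
  simp only [pvToTuple, List.map_cons, List.map_nil]

-- ===== VERDICT (by name: the statement is the Claim_ definition above) =====
theorem fourcardcombos_spec : Claim_equal_fourcardcombos := by
  intro n _
  show fourcardcombos n = fourcardcombos_alt n
  rw [pv_A_eq_flatMap, pv_B_eq_flatMap]
  simp only [pv_cut3, pv_cut2, pv_cut1]
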